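-- pv_equiv track=rewrite | github.com/basind/TUBES-DASPRO | helper.py | validasiSaldo
-- ===== SOURCE A (Python) =====
-- def panjang(item):
--     # Helper panjang untuk mengecek panjang suatu item (list, string, dsb)
--
--     # KAMUS LOKAL
--     # counter : integer
--     # _ : iterator
--
--     # ALGORITMA
--     counter = 0
--     for _ in item:
--         counter += 1
--     return counter
--
-- def validasiSaldo(saldo):
--     # Melakukan validasi pada suatu saldo atau harga
--
--     # KAMUS LOKAL
--     # temp: string
--     # count: integer
--     # meet_titik: boolean
--     # item: iterator
--
--
--     # ALGORITMA
--     if panjang(saldo) == 0: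
--         return False
--     else:
--         temp = ''
--         count = 0
--         meet_titik = False
--         for item in saldo:
--             if item == '-':
--                 continue
--             elif not meet_titik and item != '.':
--                 temp += item
--                 count += 1
--             elif item != '.':
--                 count -= 1
--                 temp += item
--             else:
--                 if not meet_titik and count > 3:
--                     return False
--                 elif meet_titik and count != 0:
--                     return False
--                 else:
--                     count = 3
--                     meet_titik = True
--                     continue
--         if count != 0 and meet_titik:
--             return False
--         try:
--             temp = int(temp)
--             return True
--         except:
--             return False
-- ===== SOURCE B (Python) =====
-- def validasiSaldo(saldo):
--     # Segment-based validation: drop '-', split at '.', check group sizes, then int().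
--     n = 0
--     for _ in saldo:
--         n += 1
--     if n == 0:
--         return False
--     segments = []
--     cur = []
--     for ch in saldo:
--         if ch == '-':
--             continue
--         if ch == '.':
--             segments.append(cur)
--             cur = []
--         else:
--             cur.append(ch)
--     segments.append(cur)
--     if len(segments) > 1:
--         if len(segments[0]) > 3:
--             return False
--         for seg in segments[1:]:
--             if len(seg) != 3:
--                 return False
--     temp = ''.join(''.join(seg) for seg in segments)
--     try:
--         int(temp)
--         return True
--     except:
--         return False
-- ===== Notes on version B (the rewrite author's own statement) =====
-- stated objective: alternative
-- what changed: Replaces A's running-counter/meet_titik state machine (counting up before the first dot, counting down to zero between dots) with an explicit segment-list representation: one pass drops minus signs and splits the characters into groups at each dot, then the first group's length is checked (at most 3, only when a dot occurred) and every later group's length must be exactly 3, followed by the same try-int conversion of the joined characters.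
import Mathlib
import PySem

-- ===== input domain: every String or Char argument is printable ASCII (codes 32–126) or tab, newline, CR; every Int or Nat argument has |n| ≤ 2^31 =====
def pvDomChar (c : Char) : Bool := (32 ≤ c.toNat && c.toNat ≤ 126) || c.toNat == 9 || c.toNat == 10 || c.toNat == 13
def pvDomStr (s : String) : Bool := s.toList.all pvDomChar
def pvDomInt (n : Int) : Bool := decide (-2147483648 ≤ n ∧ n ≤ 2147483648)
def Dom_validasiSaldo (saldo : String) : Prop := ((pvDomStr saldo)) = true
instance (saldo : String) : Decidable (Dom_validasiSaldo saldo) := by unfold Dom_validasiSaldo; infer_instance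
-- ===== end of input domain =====

-- B replaces A's running-counter/meet_titik state machine by an explicit segment list
-- (split at '.', '-' dropped) with per-segment length checks; objective: alternative, same O(n) cost.

-- ===== PORT A =====
-- helper panjang: counts elements with an explicit counter loop
def panjangPort (item : List Char) : Int := item.foldl (fun counter _ => counter + 1) 0

-- the for-loop of A with its early returns (none = early `return False`)
def loopA : List Char → List Char → Int → Bool → Option (List Char × Int × Bool)
  | [], temp, count, meet => some (temp, count, meet)
  | c :: rest, temp, count, meet =>
    if c = '-' then loopA rest temp count meet
    else if !meet && c ≠ '.' then loopA rest (temp ++ [c]) (count + 1) meet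
    else if c ≠ '.' then loopA rest (temp ++ [c]) (count - 1) meet
    else if !meet && count > 3 then none
    else if meet && count ≠ 0 then none
    else loopA rest temp 3 true

def validasiSaldo (saldo : String) : Bool :=
  if panjangPort saldo.toList = 0 then false
  else
    match loopA saldo.toList [] 0 false with
    | none => false
    | some (temp, count, meet) =>
      if count ≠ 0 && meet then false
      else (PySem.Int.ofChars? temp).isSome   -- try: int(temp); except: False

-- ===== PORT B =====
-- one pass: drop '-', split into character groups at each '.'
def segsB : List Char → List Char → List (List Char)
  | cur, [] => [cur]
  | cur, c :: rest =>
    if c = '-' then segsB cur rest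
    else if c = '.' then cur :: segsB [] rest
    else segsB (cur ++ [c]) rest

def validasiSaldo_alt (saldo : String) : Bool :=
  let cs := saldo.toList
  if cs.foldl (fun n _ => n + 1) (0 : Int) = 0 then false
  else
    let segments := segsB [] cs
    if segments.length > 1 &&
        (decide ((segments.headD []).length > 3) ||
          (segments.drop 1).any (fun seg => seg.length != 3)) then false
    else (PySem.Int.ofChars? segments.flatten).isSome   -- try: int(temp); except: False

-- ===== PRECONDITION & SPEC =====
def Spec_validasiSaldo (saldo : String) (out : Bool) : Prop := out = validasiSaldo_alt saldo
instance (saldo : String) (out : Bool) : Decidable (Spec_validasiSaldo saldo out) := by unfold Spec_validasiSaldo; infer_instance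

-- ===== CLAIM (what is proved, stated in full; the proofs are below) =====
def Claim_equal_validasiSaldo : Prop := ∀ (saldo : String), Dom_validasiSaldo saldo → Spec_validasiSaldo saldo (validasiSaldo saldo)

-- ===== LEMMAS AND PROOFS =====

-- the tail of A (early-return handling + final checks + int conversion)
def finA : Option (List Char × Int × Bool) → Bool
  | none => false
  | some (temp, count, meet) =>
    if count ≠ 0 && meet then false
    else (PySem.Int.ofChars? temp).isSome

theorem flatten_segsB (cs cur : List Char) :
    (segsB cur cs).flatten = cur ++ cs.filter (fun c => c != '-' && c != '.') := by
  induction cs generalizing cur with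
  | nil => simp [segsB]
  | cons c rest ih =>
    by_cases h1 : c = '-'
    · simp [segsB, h1, ih]
    · by_cases h2 : c = '.'
      · simp [segsB, h2, ih]
      · simp [segsB, h1, h2, ih, bne]

theorem segsB_ne_nil (cs : List Char) : ∀ (cur : List Char), segsB cur cs ≠ [] := by
  induction cs with
  | nil => intro cur; simp [segsB]
  | cons c rest ih =>
    intro cur
    by_cases h1 : c = '-'
    · simp [segsB, h1, ih]
    · by_cases h2 : c = '.' <;> simp [segsB, h1, h2, ih]

-- meet_titik phase: count = 3 - (length of current group); result = every group has length 3
theorem loopA_true (cs : List Char) : ∀ (cur temp : List Char),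
    finA (loopA cs temp (3 - (cur.length : Int)) true) =
      (if (segsB cur cs).all (fun s => s.length == 3)
       then (PySem.Int.ofChars? (temp ++ cs.filter (fun c => c != '-' && c != '.'))).isSome
       else false) := by
  induction cs with
  | nil =>
    intro cur temp
    simp only [loopA, segsB, finA, List.all_cons, List.all_nil, List.filter_nil, List.append_nil]
    by_cases h : cur.length = 3
    · simp [h]
    · have : (3 : Int) - (cur.length : Int) ≠ 0 := by omega
      simp [h, this]
  | cons c rest ih =>
    intro cur temp
    by_cases h1 : c = '-'
    · simp only [loopA, segsB, h1, List.filter]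
      simpa using ih cur temp
    · by_cases h2 : c = '.'
      · by_cases h3 : cur.length = 3
        · have hc : (3 : Int) - (cur.length : Int) = 0 := by omega
          simp only [loopA, segsB, h2, hc, List.filter]
          have := ih [] temp
          simp only [List.length_nil, Nat.cast_zero, sub_zero] at this
          simp_all
        · have hc : (3 : Int) - (cur.length : Int) ≠ 0 := by omega
          simp only [loopA, segsB, h2]
          simp [hc, finA, h3]
      · have harith : (3 : Int) - (cur.length : Int) - 1 = 3 - ((cur ++ [c]).length : Int) := by
          simp; omega
        simp only [loopA, segsB, h1, h2, List.filter_cons]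
        have := ih (cur ++ [c]) (temp ++ [c])
        simp only [← harith] at this
        simp_all [List.append_assoc, bne]

-- pre-'.' phase: temp = cur, count = its length; result = B's check on the remaining segments
theorem loopA_false (cs : List Char) : ∀ (cur : List Char),
    finA (loopA cs cur (cur.length : Int) false) =
      (let segments := segsB cur cs
       if segments.length > 1 &&
           (decide ((segments.headD []).length > 3) ||
             (segments.drop 1).any (fun seg => seg.length != 3)) then false
       else (PySem.Int.ofChars? segments.flatten).isSome) := by
  induction cs with
  | nil => intro cur; simp [loopA, segsB, finA]
  | cons c rest ih =>
    intro cur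
    by_cases h1 : c = '-'
    · simp only [loopA, segsB, h1]
      simpa using ih cur
    · by_cases h2 : c = '.'
      · have hne := segsB_ne_nil rest []
        have hlen : 0 < (segsB [] rest).length := List.length_pos_of_ne_nil hne
        by_cases h3 : cur.length > 3
        · have hc : ((cur.length : Int) > 3) := by omega
          simp only [loopA, segsB, h2]
          simp [hc, finA, h3, hlen]
        · have hc : ¬ ((cur.length : Int) > 3) := by omega
          simp only [loopA, segsB, h2]
          have hT := loopA_true rest [] cur
          simp only [List.length_nil, Nat.cast_zero, sub_zero] at hT
          simp only [hc]
          by_cases h4 : ∀ s ∈ segsB [] rest, s.length = 3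
          · have hnoany : ¬ ∃ s ∈ segsB [] rest, ¬ s.length = 3 := by push Not; exact h4
            simp_all [flatten_segsB, finA]
          · push Not at h4
            obtain ⟨s, hs, hsl⟩ := h4
            have hany : ∃ s ∈ segsB [] rest, ¬ s.length = 3 := ⟨s, hs, hsl⟩
            have hnall : ¬ ∀ s ∈ segsB [] rest, s.length = 3 := by push Not; exact hany
            simp_all [flatten_segsB, finA]
      · have harith : (cur.length : Int) + 1 = ((cur ++ [c]).length : Int) := by simp
        simp only [loopA, segsB, h1, h2]
        have := ih (cur ++ [c])
        simp only [← harith] at this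
        simp_all

-- ===== VERDICT (by name: the statement is the Claim_ definition above) =====
theorem validasiSaldo_spec : Claim_equal_validasiSaldo := by
  intro saldo _
  unfold Spec_validasiSaldo validasiSaldo validasiSaldo_alt panjangPort
  by_cases h : saldo.toList.foldl (fun n (_ : Char) => n + 1) (0 : Int) = 0
  · simp [h]
  · simp only [h]
    have := loopA_false saldo.toList []
    simp only [List.length_nil, Nat.cast_zero] at this
    rw [show (∀ x, finA x = match x with
      | none => false
      | some (temp, count, meet) => if count ≠ 0 && meet then false
        else (PySem.Int.ofChars? temp).isSome) from fun x => by cases x <;> rfl] at this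
    simp_all
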